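-- pv_equiv track=rewrite | github.com/kidkezz/Python-practice | week6/day 5.py | superDigitv2
-- ===== SOURCE A (Python) =====
-- def superDigitv2(n, k):
--     """
--     This function calculates the super digit of a number.
--
--     Parameters:
--     n (str): The number for which the super digit is to be calculated.
--     k (int): The number of times 'n' is concatenated.
--
--     Returns:
--     str: The super digit of the number 'n' repeated 'k' times.
--
--     """
--     def sumOfDigits(num):
--         """
--         This helper function calculates the sum of digits of a number.
--
--         Parameters:
--         num (str): The number for which the sum of digits is to be calculated.
--
--         Returns:
--         str: The sum of digits if it is a single digit, else calls itself recursively.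
--         """
--         ite = 0
--         for i in num:
--             ite += int(i)
--         ite = str(ite)
--         if len(ite) == 1:
--             return ite
--         else:
--             return sumOfDigits(ite)
--     num = str(sumOfDigits(n) * k)
--     return sumOfDigits(num)
-- ===== SOURCE B (Python) =====
-- def superDigitv2(n, k):
--     # digital-root closed form: one pass over n, no recursion, no k-fold string build
--     s = 0
--     for c in n:
--         s += int(c)
--     d = 0 if s == 0 else 1 + (s - 1) % 9
--     total = d * k if k > 0 else 0
--     return str(0 if total == 0 else 1 + (total - 1) % 9)
-- ===== Notes on version B (the rewrite author's own statement) =====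
-- stated objective: faster
-- what changed: Replaces the recursive digit-summing helper and the k-fold string repetition with a single pass over n followed by the digital-root closed form 1 + (x-1) % 9, never materialising the length-k intermediate string.
import Mathlib
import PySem

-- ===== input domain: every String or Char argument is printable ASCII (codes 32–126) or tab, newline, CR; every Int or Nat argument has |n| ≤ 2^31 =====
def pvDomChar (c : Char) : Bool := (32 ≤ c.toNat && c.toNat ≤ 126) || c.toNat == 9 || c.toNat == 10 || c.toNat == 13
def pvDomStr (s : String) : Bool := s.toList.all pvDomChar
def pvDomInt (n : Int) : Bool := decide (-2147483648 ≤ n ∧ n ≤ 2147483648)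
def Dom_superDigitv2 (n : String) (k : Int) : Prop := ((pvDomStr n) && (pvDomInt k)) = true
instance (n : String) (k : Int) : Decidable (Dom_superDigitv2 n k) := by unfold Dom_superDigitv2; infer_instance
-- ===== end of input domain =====

-- B replaces A's recursive digit-summing and k-fold string repetition by the digital-root
-- closed form computed in one pass over n (return value only; neither version mutates anything).

-- ===== PORT A =====
-- 'ite += int(i)' accumulated over the chars of num; int(i) = PySem.Int.ofChars? [i],
-- none (= ValueError, excluded by Pre_) aborts the fold.
def aStep (acc : Option Int) (c : Char) : Option Int :=
  match acc with
  | none => none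
  | some a =>
    match PySem.Int.ofChars? [c] with
    | none => none
    | some v => some (a + v)

def aSum? (cs : List Char) : Option Int := cs.foldl aStep (some 0)

-- fuel for the totalised recursion of sumOfDigits; sum of char codes + 1 always suffices
-- on digit strings (proved below), so it is only a totality guard, not an algorithm change
def aFuel (cs : List Char) : Nat := cs.foldl (fun a c => a + c.toNat) 0 + 1

-- sumOfDigits: ite = sum of int(i); str(ite); return it if single char, else recurse
def aSumOfDigits : Nat → List Char → Option (List Char)
  | 0, _ => none
  | fuel+1, num =>
    match aSum? num with
    | none => none
    | some ite =>
      let s := PySem.Int.toChars ite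
      if s.length = 1 then some s else aSumOfDigits fuel s

def superDigitv2 (n : String) (k : Int) : String :=
  match aSumOfDigits (aFuel n.toList) n.toList with
  | none => ""                                     -- unreachable under Pre_
  | some d =>
    -- num = str(sumOfDigits(n) * k): Python string repetition (empty for k ≤ 0)
    let num := PySem.List.pyRepeat d k
    match aSumOfDigits (aFuel num) num with
    | none => ""                                   -- unreachable under Pre_
    | some r => String.ofList r

-- ===== PORT B =====
def superDigitv2_alt (n : String) (k : Int) : String :=
  let s : Int := (n.toList.map (fun c => (PySem.Int.ofChars? [c]).getD 0)).sum
  let d : Int := if s = 0 then 0 else 1 + PySem.Int.mod (s - 1) 9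
  let total : Int := if 0 < k then d * k else 0
  PySem.Int.toStr (if total = 0 then 0 else 1 + PySem.Int.mod (total - 1) 9)

-- ===== PRECONDITION & SPEC =====
-- Pre_ excludes exactly the inputs where A raises: int(i) raises ValueError on any
-- character of n that is not a decimal digit 0-9.
def Pre_superDigitv2 (n : String) (k : Int) : Prop := n.toList.all Char.isDigit = true
instance (n : String) (k : Int) : Decidable (Pre_superDigitv2 n k) := by unfold Pre_superDigitv2; infer_instance

def pvWitness_superDigitv2 : String × Int := ("148", 3)

def Spec_superDigitv2 (n : String) (k : Int) (out : String) : Prop := out = superDigitv2_alt n k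
instance (n : String) (k : Int) (out : String) : Decidable (Spec_superDigitv2 n k out) := by unfold Spec_superDigitv2; infer_instance

-- ===== CLAIM (what is proved, stated in full; the proofs are below) =====
def Claim_equal_superDigitv2 : Prop := ∀ (n : String) (k : Int), Dom_superDigitv2 n k → Pre_superDigitv2 n k → Spec_superDigitv2 n k (superDigitv2 n k)

-- ===== LEMMAS AND PROOFS =====

-- value of a digit character, digit sum of a digit string, mathematical digital root
def dval (c : Char) : Nat := c.toNat - 48
def natS (cs : List Char) : Nat := (cs.map dval).sum
def droot (v : Nat) : Nat := if v = 0 then 0 else 1 + (v - 1) % 9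

lemma isDigit_bounds {c : Char} (h : c.isDigit = true) : 48 ≤ c.toNat ∧ c.toNat ≤ 57 := by
  simp only [Char.isDigit, Bool.and_eq_true, decide_eq_true_eq] at h
  obtain ⟨h1, h2⟩ := h
  exact ⟨h1, h2⟩

lemma digit_val {c : Char} (h : c.isDigit = true) :
    PySem.Int.ofChars? [c] = some ((c.toNat : Int) - 48) := by
  obtain ⟨h1, h2⟩ := isDigit_bounds h
  rw [← Char.ofNat_toNat c]
  interval_cases h : c.toNat <;> decide

lemma digitChar_isDigit {d : Nat} (h : d ≤ 9) : (Nat.digitChar d).isDigit = true := by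
  interval_cases d <;> decide

lemma digitChar_toNat {d : Nat} (h : d ≤ 9) : (Nat.digitChar d).toNat = d + 48 := by
  interval_cases d <;> decide

lemma dval_digitChar {d : Nat} (h : d ≤ 9) : dval (Nat.digitChar d) = d := by
  simp [dval, digitChar_toNat h]

lemma aSum_digits (cs : List Char) (h : ∀ c ∈ cs, c.isDigit = true) :
    aSum? cs = some ((natS cs : Nat) : Int) := by
  have key : ∀ (cs : List Char), (∀ c ∈ cs, c.isDigit = true) → ∀ (a : Nat),
      cs.foldl aStep (some (a : Int)) = some (((a + natS cs : Nat) : Int)) := by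
    intro cs
    induction cs with
    | nil => intro _ a; simp [natS]
    | cons c cs ih =>
      intro h a
      have hc : c.isDigit = true := h c (by simp)
      have hb := isDigit_bounds hc
      have : aStep (some (a : Int)) c = some (((a + dval c : Nat) : Int)) := by
        simp only [aStep, digit_val hc]
        congr 1
        simp only [dval]
        push_cast
        omega
      rw [List.foldl_cons, this, ih (fun x hx => h x (by simp [hx])) (a + dval c)]
      congr 1
      simp only [natS, List.map_cons, List.sum_cons]
      push_cast
      ring
  have := key cs h 0
  simpa [aSum?] using this

lemma foldl_codes (cs : List Char) :
    cs.foldl (fun a c => a + c.toNat) 0 = (cs.map Char.toNat).sum := by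
  have key : ∀ (cs : List Char) (a : Nat),
      cs.foldl (fun a c => a + c.toNat) a = a + (cs.map Char.toNat).sum := by
    intro cs
    induction cs with
    | nil => simp
    | cons c cs ih => intro a; simp [ih, Nat.add_assoc]
  simpa using key cs 0

lemma natS_le_codes (cs : List Char) (h : ∀ c ∈ cs, c.isDigit = true) :
    natS cs ≤ (cs.map Char.toNat).sum := by
  induction cs with
  | nil => simp [natS]
  | cons c cs ih =>
    have hb := isDigit_bounds (h c (by simp))
    have := ih (fun x hx => h x (by simp [hx]))
    simp only [natS, List.map_cons, List.sum_cons] at *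
    have : dval c ≤ c.toNat := by simp [dval]
    omega

lemma toDigitsCore_eq (f : Nat) : ∀ (n : Nat) (acc : List Char), n ≠ 0 → n ≤ f →
    Nat.toDigitsCore 10 f n acc = ((Nat.digits 10 n).map Nat.digitChar).reverse ++ acc := by
  induction f with
  | zero => intro n acc h1 h2; omega
  | succ f ih =>
    intro n acc h1 h2
    rw [Nat.digits_def' (by norm_num : (1:Nat) < 10) (by omega)]
    simp only [Nat.toDigitsCore]
    by_cases hd : n / 10 = 0
    · have hnil : Nat.digits 10 (n / 10) = [] := by rw [hd]; simp
      rw [hnil]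
      simp [hd]
    · have hrec : n / 10 ≤ f := by omega
      rw [if_neg hd, ih (n / 10) _ hd hrec]
      simp

lemma toChars_nat (v : Nat) : PySem.Int.toChars (v : Int) =
    if v = 0 then ['0'] else ((Nat.digits 10 v).map Nat.digitChar).reverse := by
  by_cases hv : v = 0
  · subst hv; decide
  · rw [if_neg hv]
    simp only [PySem.Int.toChars]
    rw [if_neg (by omega)]
    have : (v : Int).toNat = v := by omega
    rw [this]
    simp only [Nat.toDigits]
    rw [toDigitsCore_eq (v + 1) v [] hv (by omega)]
    simp

lemma toChars_all_digits (v : Nat) : ∀ c ∈ PySem.Int.toChars (v : Int), c.isDigit = true := by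
  rw [toChars_nat]
  by_cases hv : v = 0
  · simp [hv]
  · rw [if_neg hv]
    intro c hc
    simp only [List.mem_reverse, List.mem_map] at hc
    obtain ⟨d, hd, rfl⟩ := hc
    exact digitChar_isDigit (by have := Nat.digits_lt_base (by norm_num) hd; omega)

lemma natS_toChars (v : Nat) : natS (PySem.Int.toChars (v : Int)) = (Nat.digits 10 v).sum := by
  rw [toChars_nat]
  by_cases hv : v = 0
  · simp [hv, natS]; decide
  · rw [if_neg hv]
    simp only [natS, List.map_reverse, List.sum_reverse, List.map_map]
    conv_rhs => rw [← List.map_id (Nat.digits 10 v)]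
    refine congrArg List.sum ?_
    apply List.map_congr_left
    intro d hd
    exact dval_digitChar (by have := Nat.digits_lt_base (by norm_num) hd; omega)

lemma len_toChars_one_iff (v : Nat) : (PySem.Int.toChars (v : Int)).length = 1 ↔ v ≤ 9 := by
  rw [toChars_nat]
  by_cases hv : v = 0
  · simp [hv]
  · rw [if_neg hv]
    rw [Nat.digits_def' (by norm_num : (1:Nat) < 10) (by omega)]
    simp only [List.map_cons, List.reverse_cons, List.length_append, List.length_reverse,
      List.length_map, List.length_cons, List.length_nil]
    constructor
    · intro h
      have : Nat.digits 10 (v / 10) = [] := by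
        cases hdig : Nat.digits 10 (v / 10) with
        | nil => rfl
        | cons x xs => rw [hdig] at h; simp at h
      have := Nat.digits_eq_nil_iff_eq_zero.mp this
      omega
    · intro h
      have : v / 10 = 0 := by omega
      rw [this]
      simp

lemma toChars_single {v : Nat} (h : v ≤ 9) : PySem.Int.toChars (v : Int) = [Nat.digitChar v] := by
  interval_cases v <;> decide

lemma dsum_lt {v : Nat} (h : 10 ≤ v) : (Nat.digits 10 v).sum < v := by
  rw [Nat.digits_def' (by norm_num : (1:Nat) < 10) (by omega)]
  have := Nat.digit_sum_le 10 (v / 10)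
  simp only [List.sum_cons]
  omega

lemma dsum_pos {v : Nat} (h : 1 ≤ v) : 0 < (Nat.digits 10 v).sum := by
  have hne : Nat.digits 10 v ≠ [] := Nat.digits_ne_nil_iff_ne_zero.mpr (by omega)
  have hmem : (Nat.digits 10 v).getLast hne ∈ Nat.digits 10 v := List.getLast_mem hne
  have hlast := Nat.getLast_digit_ne_zero 10 (show v ≠ 0 by omega)
  have := List.single_le_sum (fun x _ => Nat.zero_le x) _ hmem
  omega

lemma droot_congr {a b : Nat} (h9 : a % 9 = b % 9) (h0 : a = 0 ↔ b = 0) : droot a = droot b := by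
  unfold droot
  split_ifs <;> omega

lemma droot_le_nine (v : Nat) : droot v ≤ 9 := by
  unfold droot; split_ifs <;> omega

lemma aSOD_eq (fuel : Nat) : ∀ (cs : List Char), (∀ c ∈ cs, c.isDigit = true) →
    natS cs < fuel →
    aSumOfDigits fuel cs = some (PySem.Int.toChars ((droot (natS cs) : Nat) : Int)) := by
  induction fuel with
  | zero => intro cs _ h; omega
  | succ fuel ih =>
    intro cs hdig hf
    simp only [aSumOfDigits, aSum_digits cs hdig]
    set v := natS cs with hv
    by_cases hle : v ≤ 9
    · rw [if_pos ((len_toChars_one_iff v).mpr hle)]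
      have : droot v = v := by unfold droot; split_ifs <;> omega
      rw [this]
    · rw [if_neg (by rw [len_toChars_one_iff]; omega)]
      rw [ih (PySem.Int.toChars (v : Int)) (toChars_all_digits v)
        (by rw [natS_toChars]; have := dsum_lt (show 10 ≤ v by omega); omega)]
      have hdr : droot (natS (PySem.Int.toChars (v : Int))) = droot v := by
        rw [natS_toChars]
        exact droot_congr ((Nat.modEq_nine_digits_sum v).symm)
          ⟨fun h => by have := dsum_pos (show 1 ≤ v by omega); omega, fun h => by omega⟩
      rw [hdr]

lemma droot_int {v : Nat} :
    (if (v : Int) = 0 then 0 else 1 + PySem.Int.mod ((v : Int) - 1) 9) = ((droot v : Nat) : Int) := by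
  by_cases hv : v = 0
  · simp [hv, droot]
  · rw [if_neg (by exact_mod_cast hv)]
    rw [PySem.Int.mod_eq_emod_of_pos (by norm_num)]
    unfold droot
    rw [if_neg hv]
    have h1 : ((v : Int) - 1) = ((v - 1 : Nat) : Int) := by omega
    rw [h1]
    push_cast
    omega

lemma natS_replicate (m : Nat) (c : Char) : natS (List.replicate m c) = m * dval c := by
  simp [natS, List.map_replicate, List.sum_replicate, smul_eq_mul]

lemma bSum_digits (cs : List Char) (h : ∀ c ∈ cs, c.isDigit = true) :
    (cs.map (fun c => (PySem.Int.ofChars? [c]).getD 0)).sum = ((natS cs : Nat) : Int) := by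
  induction cs with
  | nil => simp [natS]
  | cons c cs ih =>
    have hc := h c (by simp)
    have hb := isDigit_bounds hc
    simp only [List.map_cons, List.sum_cons]
    rw [ih (fun x hx => h x (by simp [hx])), digit_val hc]
    simp only [Option.getD_some, natS, List.map_cons, List.sum_cons, dval]
    push_cast
    omega

-- ===== VERDICT (by name: the statement is the Claim_ definition above) =====
theorem superDigitv2_spec : Claim_equal_superDigitv2 := by
  intro n k _ hpre
  unfold Spec_superDigitv2
  have hdig : ∀ c ∈ n.toList, c.isDigit = true := by
    intro c hc
    exact List.all_eq_true.mp hpre c hc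
  -- A side, first call
  have hfuel1 : natS n.toList < aFuel n.toList := by
    have := natS_le_codes n.toList hdig
    unfold aFuel; rw [foldl_codes]; omega
  set r := droot (natS n.toList) with hr
  have hr9 : r ≤ 9 := droot_le_nine _
  have hcall1 := aSOD_eq (aFuel n.toList) n.toList hdig hfuel1
  -- the repeated string
  set num := PySem.List.pyRepeat (PySem.Int.toChars ((r : Nat) : Int)) k with hnum
  have hnum_eq : num = List.replicate k.toNat (Nat.digitChar r) := by
    rw [hnum, toChars_single hr9, PySem.List.pyRepeat_singleton]
  have hnumdig : ∀ c ∈ num, c.isDigit = true := by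
    rw [hnum_eq]
    intro c hc
    rw [List.eq_of_mem_replicate hc]
    exact digitChar_isDigit hr9
  have hnumS : natS num = k.toNat * r := by
    rw [hnum_eq, natS_replicate, dval_digitChar hr9]
  have hfuel2 : natS num < aFuel num := by
    have := natS_le_codes num hnumdig
    unfold aFuel; rw [foldl_codes]; omega
  have hcall2 := aSOD_eq (aFuel num) num hnumdig hfuel2
  -- evaluate A
  have hA : superDigitv2 n k =
      String.ofList (PySem.Int.toChars ((droot (k.toNat * r) : Nat) : Int)) := by
    unfold superDigitv2
    rw [hcall1]
    simp only [← hr]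
    rw [hcall2, hnumS]
  rw [hA]
  -- evaluate B
  simp only [superDigitv2_alt]
  rw [bSum_digits n.toList hdig, droot_int]
  have htotal : (if 0 < k then ((r : Nat) : Int) * k else 0) = ((k.toNat * r : Nat) : Int) := by
    by_cases hk : 0 < k
    · rw [if_pos hk]
      have : (k.toNat : Int) = k := by omega
      push_cast
      rw [this]; ring
    · rw [if_neg hk]
      have : k.toNat = 0 := by omega
      simp [this]
  rw [htotal, droot_int]
  rfl
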